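-- pv_equiv track=rewrite | github.com/br18b/crz_scraper | 05_filter_contracts.py | _subtree_ids_cached
-- ===== SOURCE A (Python) =====
-- from typing import Any, Dict, List, Optional, Tuple
--
-- def _subtree_ids_cached(root: int, children: dict[int, List[int]], cache: dict[int, List[int]]) -> List[int]:
--     if root in cache:
--         return cache[root]
--     out: List[int] = []
--     stack = [root]
--     seen: set[int] = set()
--     while stack:
--         i = stack.pop()
--         if i in seen:
--             continue
--         seen.add(i)
--         out.append(i)
--         stack.extend(reversed(children.get(i, [])))
--     cache[root] = out
--     return out
-- ===== SOURCE B (Python) =====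
-- # B: same cache guard and cache[root] write-back as A, but the traversal is a
-- # recursive preorder DFS (visit each node once, children in forward order)
-- # instead of A's explicit reversed-extend node stack.  Return-value equivalence;
-- # both A and B also mutate cache (cache[root] = out).
-- def _subtree_ids_cached(root, children, cache):
--     if root in cache:
--         return cache[root]
--     out = []
--     seen = set()
--     def visit(i):
--         if i in seen:
--             return
--         seen.add(i)
--         out.append(i)
--         for c in children.get(i, []):
--             visit(c)
--     visit(root)
--     cache[root] = out
--     return out
-- ===== Notes on version B (the rewrite author's own statement) =====
-- stated objective: simpler
-- what changed: Replaces A's explicit node-stack loop (extend with reversed(children), seen-check at pop, duplicate pushes) by a plain recursive preorder DFS visiting children in forward order with the seen-check at visit time; same cache guard and cache[root] write-back.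
import Mathlib
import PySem

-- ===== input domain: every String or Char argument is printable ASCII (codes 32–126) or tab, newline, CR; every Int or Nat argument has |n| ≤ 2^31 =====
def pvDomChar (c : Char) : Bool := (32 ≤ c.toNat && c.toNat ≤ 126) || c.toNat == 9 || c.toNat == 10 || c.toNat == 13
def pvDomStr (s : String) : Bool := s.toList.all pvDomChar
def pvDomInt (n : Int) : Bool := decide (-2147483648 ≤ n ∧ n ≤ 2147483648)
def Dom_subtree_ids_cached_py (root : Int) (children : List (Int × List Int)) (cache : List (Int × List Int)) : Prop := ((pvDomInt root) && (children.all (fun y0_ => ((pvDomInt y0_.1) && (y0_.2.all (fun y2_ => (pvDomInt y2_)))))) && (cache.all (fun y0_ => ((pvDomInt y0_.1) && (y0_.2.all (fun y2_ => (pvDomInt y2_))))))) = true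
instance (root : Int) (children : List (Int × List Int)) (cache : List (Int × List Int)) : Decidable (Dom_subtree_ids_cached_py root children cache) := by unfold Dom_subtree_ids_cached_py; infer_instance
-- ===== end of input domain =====

-- B replaces A's reversed-node-stack DFS (seen checked at pop, duplicate pushes) by a
-- plain recursive preorder DFS over forward child lists; equivalence is about the RETURN
-- value only — both Pythons also write cache[root] = out (same mutation in A and B).

-- ===== PORT A =====
-- sum over dict entries whose key is not yet seen of the child-list length;
-- pvFuelA = 1 + that sum at seen = {} bounds the number of loop iterations of A's
-- while-loop (proved below); the zero-fuel branch of pvLoopA is never reached.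
def pvUnseenLen (children : List (Int × List Int)) (seen : List Int) : Nat :=
  (children.map (fun p => if p.1 ∈ seen then 0 else p.2.length)).sum

def pvFuelA (children : List (Int × List Int)) : Nat := 1 + pvUnseenLen children []

-- A's while-loop. Python's stack has its top at the END; we keep the top at the HEAD,
-- under which 'stack.extend(reversed(cs)); i = stack.pop()' is exactly 'cs ++ stack'
-- with a head pop (the two reversals cancel) — step-for-step the same loop.
def pvLoopA (children : List (Int × List Int)) :
    Nat → List Int → PySem.Set Int → List Int → List Int
  | 0, _, _, out => out
  | _, [], _, out => out                                   -- while stack: … exits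
  | f+1, i :: st, seen, out =>
    if i ∈ seen then pvLoopA children f st seen out        -- if i in seen: continue
    else pvLoopA children f ((PySem.Dict.mk children).getD i [] ++ st)
          (PySem.Set.add seen i) (out ++ [i])

def subtree_ids_cached_py (root : Int) (children : List (Int × List Int)) (cache : List (Int × List Int)) : List Int :=
  match (PySem.Dict.mk cache).get? root with
  | some v => v                                            -- if root in cache: return cache[root]
  | none => pvLoopA children (pvFuelA children) [root] PySem.Set.empty []

-- ===== PORT B =====
-- B's recursion depth is bounded by the number of distinct visitable nodes, so
-- pvFuelB = 1 + (total child count over dict entries) is enough fuel (proved below);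
-- the zero-fuel branch of pvVisit is never reached.
def pvFuelB (children : List (Int × List Int)) : Nat :=
  1 + (children.map (fun p => p.2.length)).sum

mutual
-- def visit(i): if i in seen: return; seen.add(i); out.append(i); for c in children.get(i,[]): visit(c)
def pvVisit (children : List (Int × List Int)) :
    Nat → Int → PySem.Set Int → List Int → PySem.Set Int × List Int
  | 0, _, seen, out => (seen, out)
  | f+1, i, seen, out =>
    if i ∈ seen then (seen, out)
    else pvVisitAll children f ((PySem.Dict.mk children).getD i [])
          (PySem.Set.add seen i) (out ++ [i])
termination_by f _ _ _ => (f, 0)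
-- the 'for c in cs: visit(c)' loop
def pvVisitAll (children : List (Int × List Int)) :
    Nat → List Int → PySem.Set Int → List Int → PySem.Set Int × List Int
  | _, [], seen, out => (seen, out)
  | f, c :: rest, seen, out =>
    let r := pvVisit children f c seen out
    pvVisitAll children f rest r.1 r.2
termination_by f cs _ _ => (f, cs.length + 1)
end

def subtree_ids_cached_py_alt (root : Int) (children : List (Int × List Int)) (cache : List (Int × List Int)) : List Int :=
  match (PySem.Dict.mk cache).get? root with
  | some v => v
  | none => (pvVisit children (pvFuelB children) root PySem.Set.empty []).2   -- visit(root); return out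

-- ===== PRECONDITION & SPEC =====
def Spec_subtree_ids_cached_py (root : Int) (children : List (Int × List Int)) (cache : List (Int × List Int)) (out : List Int) : Prop := out = subtree_ids_cached_py_alt root children cache
instance (root : Int) (children : List (Int × List Int)) (cache : List (Int × List Int)) (out : List Int) : Decidable (Spec_subtree_ids_cached_py root children cache out) := by unfold Spec_subtree_ids_cached_py; infer_instance

-- ===== CLAIM (what is proved, stated in full; the proofs are below) =====
def Claim_equal_subtree_ids_cached_py : Prop := ∀ (root : Int) (children : List (Int × List Int)) (cache : List (Int × List Int)), Dom_subtree_ids_cached_py root children cache → Spec_subtree_ids_cached_py root children cache (subtree_ids_cached_py root children cache)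

-- ===== LEMMAS AND PROOFS =====

-- A's loop with EXACT fuel = remaining iterations (pvMuA); step equations proved below
def pvMuA (children : List (Int × List Int)) (st : List Int) (seen : List Int) : Nat :=
  st.length + pvUnseenLen children seen

def pvRunA (children : List (Int × List Int)) (st : List Int) (seen : PySem.Set Int) (out : List Int) : List Int :=
  pvLoopA children (pvMuA children st seen) st seen out

theorem pvGetD_mk_cons (k i : Int) (v : List Int) (rest : List (Int × List Int)) :
    (PySem.Dict.mk ((k, v) :: rest)).getD i []
      = if k == i then v else (PySem.Dict.mk rest).getD i [] := by
  simp only [PySem.Dict.getD, PySem.Dict.get?_mk_cons]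
  split <;> rfl

theorem pvUnseenLen_mono (children : List (Int × List Int)) (s s' : List Int)
    (h : ∀ x, x ∈ s → x ∈ s') : pvUnseenLen children s' ≤ pvUnseenLen children s := by
  induction children with
  | nil => simp [pvUnseenLen]
  | cons p rest ih =>
    simp only [pvUnseenLen, List.map_cons, List.sum_cons] at ih ⊢
    have hterm : (if p.1 ∈ s' then 0 else p.2.length)
        ≤ (if p.1 ∈ s then 0 else p.2.length) := by
      by_cases hp : p.1 ∈ s
      · simp [hp, h _ hp]
      · split <;> omega
    omega

theorem pvUnseenLen_add (children : List (Int × List Int)) (s : List Int) (i : Int)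
    (hi : i ∉ s) :
    pvUnseenLen children (s ++ [i]) + ((PySem.Dict.mk children).getD i []).length
      ≤ pvUnseenLen children s := by
  induction children with
  | nil => simp [pvUnseenLen, PySem.Dict.getD, PySem.Dict.get?]
  | cons p rest ih =>
    obtain ⟨k, v⟩ := p
    rw [pvGetD_mk_cons]
    simp only [pvUnseenLen, List.map_cons, List.sum_cons] at ih ⊢
    by_cases hk : k = i
    · subst hk
      have hmono := pvUnseenLen_mono rest s (s ++ [k]) (fun x hx => by simp [hx])
      simp only [pvUnseenLen] at hmono
      have h1 : k ∈ s ++ [k] := by simp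
      rw [if_pos h1, if_neg hi]
      simp only [BEq.rfl, if_true]
      omega
    · have hbeq : (k == i) = false := by simp [hk]
      have hmemk : (k ∈ s ++ [i]) ↔ k ∈ s := by simp [hk]
      simp only [hbeq, Bool.false_eq_true, if_false]
      by_cases hks : k ∈ s
      · rw [if_pos hks, if_pos (hmemk.mpr hks)]; omega
      · rw [if_neg hks, if_neg (fun hc => hks (hmemk.mp hc))]; omega

-- fuel irrelevance for A's loop: any fuel ≥ the measure gives the same result
theorem pvLoopA_fuel (children : List (Int × List Int)) :
    ∀ (f g : Nat) (st : List Int) (seen : PySem.Set Int) (out : List Int),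
      pvMuA children st seen ≤ f → pvMuA children st seen ≤ g →
      pvLoopA children f st seen out = pvLoopA children g st seen out := by
  intro f
  induction f with
  | zero =>
    intro g st seen out hf hg
    have : st = [] := by
      cases st with
      | nil => rfl
      | cons a l => simp [pvMuA] at hf
    subst this
    cases g <;> simp [pvLoopA]
  | succ f ih =>
    intro g st seen out hf hg
    cases st with
    | nil => cases g <;> simp [pvLoopA]
    | cons i st' =>
      cases g with
      | zero => simp [pvMuA] at hg
      | succ g =>
        simp only [pvLoopA]
        by_cases hi : i ∈ seen
        · simp only [hi, if_pos]
          exact ih g st' seen out (by simp [pvMuA] at hf ⊢; omega)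
            (by simp [pvMuA] at hg ⊢; omega)
        · simp only [hi, if_neg, not_false_iff]
          have hadd : PySem.Set.add seen i = seen ++ [i] := PySem.Set.add_of_not_mem hi
          have hlen := pvUnseenLen_add children seen i hi
          apply ih
          · simp [pvMuA, hadd] at hf ⊢; omega
          · simp [pvMuA, hadd] at hg ⊢; omega

-- step equations for pvRunA (A's loop with exact fuel)
theorem pvRunA_nil (children : List (Int × List Int)) (seen : PySem.Set Int) (out : List Int) :
    pvRunA children [] seen out = out := by
  unfold pvRunA
  cases h : pvMuA children [] seen <;> simp [pvLoopA]

theorem pvRunA_cons_seen (children : List (Int × List Int)) (i : Int) (st : List Int)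
    (seen : PySem.Set Int) (out : List Int) (hi : i ∈ seen) :
    pvRunA children (i :: st) seen out = pvRunA children st seen out := by
  unfold pvRunA
  have hmu : pvMuA children (i :: st) seen = pvMuA children st seen + 1 := by
    simp [pvMuA]; omega
  rw [hmu]
  simp [pvLoopA, hi]

theorem pvRunA_cons_unseen (children : List (Int × List Int)) (i : Int) (st : List Int)
    (seen : PySem.Set Int) (out : List Int) (hi : i ∉ seen) :
    pvRunA children (i :: st) seen out
      = pvRunA children ((PySem.Dict.mk children).getD i [] ++ st)
          (PySem.Set.add seen i) (out ++ [i]) := by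
  unfold pvRunA
  have hmu : pvMuA children (i :: st) seen = pvMuA children st seen + 1 := by
    simp [pvMuA]; omega
  rw [hmu]
  simp only [pvLoopA, hi, if_neg, not_false_iff]
  apply pvLoopA_fuel
  · have hadd : PySem.Set.add seen i = seen ++ [i] := PySem.Set.add_of_not_mem hi
    have := pvUnseenLen_add children seen i hi
    simp [pvMuA, hadd]
    omega
  · exact le_refl _

-- main simulation: B's recursive DFS computes exactly A's stack loop.
-- Strong induction on the fuel; the inner 'for'-loop claim is proved by list
-- induction inline.  Conclusions: seen only grows, the unseen measure does not
-- grow, and the run of A's loop commutes.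
theorem pvVisit_ok (children : List (Int × List Int)) :
    ∀ (f : Nat) (i : Int) (seen : PySem.Set Int) (out : List Int),
      pvUnseenLen children seen < f →
      (∀ x, x ∈ seen → x ∈ (pvVisit children f i seen out).1)
      ∧ pvUnseenLen children (pvVisit children f i seen out).1 ≤ pvUnseenLen children seen
      ∧ ∀ st, pvRunA children (i :: st) seen out
          = pvRunA children st (pvVisit children f i seen out).1 (pvVisit children f i seen out).2 := by
  intro f
  induction f with
  | zero => intro i seen out hf; omega
  | succ f ih =>
    -- first: the same three conclusions for pvVisitAll at fuel f, any child list
    have hall : ∀ (cs : List Int) (seen : PySem.Set Int) (out : List Int),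
        pvUnseenLen children seen < f ∨ cs = [] →
        (∀ x, x ∈ seen → x ∈ (pvVisitAll children f cs seen out).1)
        ∧ pvUnseenLen children (pvVisitAll children f cs seen out).1 ≤ pvUnseenLen children seen
        ∧ ∀ st, pvRunA children (cs ++ st) seen out
            = pvRunA children st (pvVisitAll children f cs seen out).1 (pvVisitAll children f cs seen out).2 := by
      intro cs
      induction cs with
      | nil =>
        intro seen out _
        exact ⟨fun x hx => by simpa [pvVisitAll] using hx, by simp [pvVisitAll],
          fun st => by simp [pvVisitAll]⟩
      | cons c rest ihc =>
        intro seen out hcase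
        have hf : pvUnseenLen children seen < f := by
          rcases hcase with h | h
          · exact h
          · simp at h
        obtain ⟨hm1, hu1, hr1⟩ := ih c seen out hf
        have hf2 : pvUnseenLen children (pvVisit children f c seen out).1 < f := by omega
        obtain ⟨hm2, hu2, hr2⟩ :=
          ihc (pvVisit children f c seen out).1 (pvVisit children f c seen out).2 (Or.inl hf2)
        refine ⟨?_, ?_, ?_⟩
        · intro x hx
          simpa [pvVisitAll] using hm2 x (hm1 x hx)
        · simpa [pvVisitAll] using le_trans hu2 hu1
        · intro st
          have h1 := hr1 (rest ++ st)
          have h2 := hr2 st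
          simp only [pvVisitAll]
          calc pvRunA children ((c :: rest) ++ st) seen out
              = pvRunA children (rest ++ st) (pvVisit children f c seen out).1
                  (pvVisit children f c seen out).2 := h1
            _ = _ := h2
    intro i seen out hflt
    by_cases hi : i ∈ seen
    · refine ⟨fun x hx => by simpa [pvVisit, hi] using hx, by simp [pvVisit, hi], fun st => ?_⟩
      simp only [pvVisit, hi, if_pos]
      exact pvRunA_cons_seen children i st seen out hi
    · set cs := (PySem.Dict.mk children).getD i [] with hcs
      have hadd : PySem.Set.add seen i = seen ++ [i] := PySem.Set.add_of_not_mem hi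
      have hdrop := pvUnseenLen_add children seen i hi
      rw [← hcs] at hdrop
      have hmonoadd : pvUnseenLen children (seen ++ [i]) ≤ pvUnseenLen children seen :=
        pvUnseenLen_mono children seen (seen ++ [i]) (fun x hx => by simp [hx])
      have hcase : pvUnseenLen children (PySem.Set.add seen i) < f ∨ cs = [] := by
        match hh : cs with
        | [] => exact Or.inr rfl
        | a :: l =>
          left
          rw [hadd]
          have hlen1 : (a :: l).length ≥ 1 := by simp
          omega
      obtain ⟨hm, hu, hr⟩ := hall cs (PySem.Set.add seen i) (out ++ [i]) hcase
      refine ⟨?_, ?_, ?_⟩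
      · intro x hx
        simp only [pvVisit, hi, if_neg, not_false_iff, ← hcs]
        exact hm x (by rw [hadd]; simp [hx])
      · simp only [pvVisit, hi, if_neg, not_false_iff, ← hcs]
        rw [hadd] at hu ⊢
        exact le_trans hu hmonoadd
      · intro st
        simp only [pvVisit, hi, if_neg, not_false_iff, ← hcs]
        rw [pvRunA_cons_unseen children i st seen out hi, ← hcs]
        exact hr st

-- ===== VERDICT (by name: the statement is the Claim_ definition above) =====
theorem subtree_ids_cached_py_spec : Claim_equal_subtree_ids_cached_py := by
  intro root children cache _
  unfold Spec_subtree_ids_cached_py subtree_ids_cached_py subtree_ids_cached_py_alt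
  cases h : (PySem.Dict.mk cache).get? root with
  | some v => rfl
  | none =>
    simp only []
    have hfuel : pvUnseenLen children PySem.Set.empty < pvFuelB children := by
      have hle : pvUnseenLen children ([] : List Int)
          ≤ (children.map (fun p => p.2.length)).sum := by
        unfold pvUnseenLen
        apply List.sum_le_sum
        intro p _
        split <;> omega
      show pvUnseenLen children [] < 1 + (children.map (fun p => p.2.length)).sum
      omega
    obtain ⟨_, _, hr⟩ := pvVisit_ok children (pvFuelB children) root PySem.Set.empty [] hfuel
    have hA : pvLoopA children (pvFuelA children) [root] PySem.Set.empty []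
        = pvRunA children [root] PySem.Set.empty [] := by
      unfold pvRunA
      apply pvLoopA_fuel
      · simp [pvMuA, pvFuelA, PySem.Set.empty]
      · exact le_refl _
    rw [hA, hr [], pvRunA_nil]
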